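-- pv_equiv track=rewrite | github.com/afinewinecompany/afinewinedynasty | apps/api/app/services/duplicate_detection_service.py | _positions_match
-- ===== SOURCE A (Python) =====
-- def _positions_match(pos1: str, pos2: str) -> bool:
--     """Check if two position strings represent the same position."""
--     # Normalize positions
--     position_groups = {
--         'pitcher': ['P', 'RHP', 'LHP', 'SP', 'RP'],
--         'catcher': ['C'],
--         'first': ['1B'],
--         'second': ['2B'],
--         'third': ['3B'],
--         'short': ['SS'],
--         'outfield': ['OF', 'LF', 'CF', 'RF'],
--         'infield': ['INF', 'IF'],
--         'utility': ['UTIL', 'UTL']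
--     }
--
--     pos1_upper = pos1.upper().strip()
--     pos2_upper = pos2.upper().strip()
--
--     # Exact match
--     if pos1_upper == pos2_upper:
--         return True
--
--     # Check if in same position group
--     for group, positions in position_groups.items():
--         if pos1_upper in positions and pos2_upper in positions:
--             return True
--
--     return False
-- ===== SOURCE B (Python) =====
-- # Canonicalization: map each normalized position to a canonical key (its group
-- # name if it is a known abbreviation, else itself) and compare once; no
-- # exact-match branch and no per-call scan over the groups.
-- _CANON = {
--     'P': 'pitcher', 'RHP': 'pitcher', 'LHP': 'pitcher', 'SP': 'pitcher', 'RP': 'pitcher',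
--     'C': 'catcher',
--     '1B': 'first', '2B': 'second', '3B': 'third', 'SS': 'short',
--     'OF': 'outfield', 'LF': 'outfield', 'CF': 'outfield', 'RF': 'outfield',
--     'INF': 'infield', 'IF': 'infield',
--     'UTIL': 'utility', 'UTL': 'utility',
-- }
--
--
-- def _canon(pos: str) -> str:
--     p = pos.upper().strip()
--     return _CANON.get(p, p)
--
--
-- def _positions_match(pos1: str, pos2: str) -> bool:
--     """Check if two position strings represent the same position."""
--     return _canon(pos1) == _canon(pos2)
-- ===== Notes on version B (the rewrite author's own statement) =====
-- stated objective: idiomatic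
-- what changed: Replaces A's exact-match branch plus per-call scan over all nine group lists with a single canonicalization: a flat abbreviation-to-group table maps each normalized string to a canonical key (its group name if known, else itself), and the function is one equality of the two canonical keys; correct because group names are lowercase and can never equal an upper()-normalized string.
import Mathlib
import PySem

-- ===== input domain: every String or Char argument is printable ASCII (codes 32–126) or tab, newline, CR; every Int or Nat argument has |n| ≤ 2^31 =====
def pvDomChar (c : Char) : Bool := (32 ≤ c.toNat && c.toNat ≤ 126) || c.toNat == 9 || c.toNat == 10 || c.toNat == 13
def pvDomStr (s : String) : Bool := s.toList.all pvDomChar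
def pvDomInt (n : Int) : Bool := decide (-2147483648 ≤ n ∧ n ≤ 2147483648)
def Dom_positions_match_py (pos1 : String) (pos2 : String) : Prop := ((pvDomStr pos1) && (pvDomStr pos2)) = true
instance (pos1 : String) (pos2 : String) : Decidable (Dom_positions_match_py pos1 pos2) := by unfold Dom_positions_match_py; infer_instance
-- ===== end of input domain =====

-- B canonicalizes each normalized position (flat abbreviation->group table, else the
-- string itself) and compares the two canonical keys once, instead of A's exact-match
-- branch plus scan over every position group (objective: idiomatic; same behaviour on Dom).


-- ===== PORT A =====
def pvGroupsA : List (String × List String) :=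
  [("pitcher", ["P", "RHP", "LHP", "SP", "RP"]),
   ("catcher", ["C"]),
   ("first", ["1B"]),
   ("second", ["2B"]),
   ("third", ["3B"]),
   ("short", ["SS"]),
   ("outfield", ["OF", "LF", "CF", "RF"]),
   ("infield", ["INF", "IF"]),
   ("utility", ["UTIL", "UTL"])]

-- the 'for group, positions in position_groups.items()' loop with early return
def pvLoopA (u1 u2 : String) : List (String × List String) → Bool
  | [] => false
  | (_, ps) :: rest => if ps.contains u1 && ps.contains u2 then true else pvLoopA u1 u2 rest

def positions_match_py (pos1 : String) (pos2 : String) : Bool :=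
  let u1 := PySem.Str.strip (PySem.Str.upper pos1)
  let u2 := PySem.Str.strip (PySem.Str.upper pos2)
  if u1 == u2 then true
  else pvLoopA u1 u2 pvGroupsA

-- ===== PORT B =====
-- the module-level flat dict literal _CANON
def pvCanonMap : PySem.Dict String String :=
  PySem.Dict.mk
    [("P", "pitcher"), ("RHP", "pitcher"), ("LHP", "pitcher"), ("SP", "pitcher"), ("RP", "pitcher"),
     ("C", "catcher"),
     ("1B", "first"), ("2B", "second"), ("3B", "third"), ("SS", "short"),
     ("OF", "outfield"), ("LF", "outfield"), ("CF", "outfield"), ("RF", "outfield"),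
     ("INF", "infield"), ("IF", "infield"),
     ("UTIL", "utility"), ("UTL", "utility")]

-- def _canon(pos): p = pos.upper().strip(); return _CANON.get(p, p)
def pvCanon (pos : String) : String :=
  let p := PySem.Str.strip (PySem.Str.upper pos)
  pvCanonMap.getD p p

def positions_match_py_alt (pos1 : String) (pos2 : String) : Bool :=
  pvCanon pos1 == pvCanon pos2

-- ===== PRECONDITION & SPEC =====
def Spec_positions_match_py (pos1 : String) (pos2 : String) (out : Bool) : Prop := out = positions_match_py_alt pos1 pos2
instance (pos1 : String) (pos2 : String) (out : Bool) : Decidable (Spec_positions_match_py pos1 pos2 out) := by unfold Spec_positions_match_py; infer_instance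

-- ===== CLAIM (what is proved, stated in full; the proofs are below) =====
def Claim_equal_positions_match_py : Prop := ∀ (pos1 : String) (pos2 : String), Dom_positions_match_py pos1 pos2 → Spec_positions_match_py pos1 pos2 (positions_match_py pos1 pos2)

-- ===== LEMMAS AND PROOFS =====

-- all 18 abbreviations, in table order
def pvAll : List String :=
  ["P", "RHP", "LHP", "SP", "RP", "C", "1B", "2B", "3B", "SS",
   "OF", "LF", "CF", "RF", "INF", "IF", "UTIL", "UTL"]

lemma pvLoopA_notin_right {u1 u2 : String} (h : u2 ∉ pvAll) :
    pvLoopA u1 u2 pvGroupsA = false := by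
  simp only [pvAll, List.mem_cons, not_or, List.not_mem_nil] at h
  obtain ⟨h1,h2,h3,h4,h5,h6,h7,h8,h9,h10,h11,h12,h13,h14,h15,h16,h17,h18,-⟩ := h
  simp [pvGroupsA, pvLoopA,
        h1,h2,h3,h4,h5,h6,h7,h8,h9,h10,h11,h12,h13,h14,h15,h16,h17,h18]

lemma pvLoopA_notin_left {u1 u2 : String} (h : u1 ∉ pvAll) :
    pvLoopA u1 u2 pvGroupsA = false := by
  simp only [pvAll, List.mem_cons, not_or, List.not_mem_nil] at h
  obtain ⟨h1,h2,h3,h4,h5,h6,h7,h8,h9,h10,h11,h12,h13,h14,h15,h16,h17,h18,-⟩ := h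
  simp [pvGroupsA, pvLoopA,
        h1,h2,h3,h4,h5,h6,h7,h8,h9,h10,h11,h12,h13,h14,h15,h16,h17,h18]

lemma pvGetD_notin {u : String} (h : u ∉ pvAll) : pvCanonMap.getD u u = u := by
  have hn : pvCanonMap.get? u = none := by
    rw [PySem.Dict.get?_eq_none_iff_not_mem_keys]
    simpa [pvCanonMap, pvAll, PySem.Dict.keys] using h
  simp [PySem.Dict.getD, hn]

-- upper() never leaves a lowercase ASCII letter in the string
lemma pvUpperChar_not_lower (c : Char) : PySem.Chars.islower (PySem.Chars.upperChar c) = false := by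
  unfold PySem.Chars.upperChar PySem.Chars.islower
  by_cases h : PySem.Chars.islower c = true
  · unfold PySem.Chars.islower at h
    simp only [h, if_true]
    simp only [Bool.and_eq_true, decide_eq_true_eq, Char.le_def] at h
    obtain ⟨h1, h2⟩ := h
    have hc1 : 97 ≤ c.toNat := h1
    have hc2 : c.toNat ≤ 122 := h2
    have hv : (c.toNat - 32).isValidChar := Or.inl (by omega)
    have ht : (Char.ofNat (c.toNat - 32)).toNat = c.toNat - 32 := by
      rw [Char.toNat_ofNat, if_pos hv]
    simp only [Bool.and_eq_false_iff, decide_eq_false_iff_not]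
    left
    intro hle
    have h' := UInt32.le_iff_toNat_le.mp (Char.le_def.mp hle)
    rw [Char.toNat_val, Char.toNat_val, ht] at h'
    have ha : ('a' : Char).toNat = 97 := rfl
    rw [ha] at h'
    omega
  · unfold PySem.Chars.islower at h
    rw [if_neg h]
    simpa using h

lemma pvNoLower (s : String) (c : Char)
    (hc : c ∈ (PySem.Str.strip (PySem.Str.upper s)).toList) :
    PySem.Chars.islower c = false := by
  rw [PySem.Str.toList_strip, PySem.Str.toList_upper] at hc
  unfold PySem.Chars.strip PySem.Chars.rstrip PySem.Chars.lstrip at hc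
  have h1 : c ∈ PySem.Chars.upper s.toList := by
    have := (List.dropWhile_sublist (p := PySem.Chars.isspace)
      (l := (List.dropWhile PySem.Chars.isspace (PySem.Chars.upper s.toList)).reverse)).mem
      (by simpa using hc)
    have := List.mem_reverse.mp this
    exact (List.dropWhile_sublist (p := PySem.Chars.isspace) (l := PySem.Chars.upper s.toList)).mem this
  unfold PySem.Chars.upper at h1
  obtain ⟨d, -, rfl⟩ := List.mem_map.mp h1
  exact pvUpperChar_not_lower d

-- a string with no lowercase character is none of the nine group names
set_option maxRecDepth 10000 in
lemma pvNotGroupName {u : String} (h : ∀ c ∈ u.toList, PySem.Chars.islower c = false) :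
    u ∉ (["pitcher", "catcher", "first", "second", "third", "short",
          "outfield", "infield", "utility"] : List String) := by
  intro hm
  simp only [List.mem_cons, List.not_mem_nil, or_false] at hm
  rcases hm with rfl|rfl|rfl|rfl|rfl|rfl|rfl|rfl|rfl
  · exact absurd (h 'p' (by simp)) (by decide)
  · exact absurd (h 'c' (by simp)) (by decide)
  · exact absurd (h 'f' (by simp)) (by decide)
  · exact absurd (h 's' (by simp)) (by decide)
  · exact absurd (h 't' (by simp)) (by decide)
  · exact absurd (h 's' (by simp)) (by decide)
  · exact absurd (h 'o' (by simp)) (by decide)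
  · exact absurd (h 'i' (by simp)) (by decide)
  · exact absurd (h 'u' (by simp)) (by decide)

-- the known abbreviations map to group names
lemma pvGetD_mem {u : String} (h : u ∈ pvAll) :
    pvCanonMap.getD u u ∈ (["pitcher", "catcher", "first", "second", "third", "short",
          "outfield", "infield", "utility"] : List String) := by
  simp only [pvAll, List.mem_cons, List.not_mem_nil, or_false] at h
  rcases h with rfl|rfl|rfl|rfl|rfl|rfl|rfl|rfl|rfl|rfl|rfl|rfl|rfl|rfl|rfl|rfl|rfl|rfl <;> decide

set_option maxHeartbeats 4000000 in
lemma pvCore (u1 u2 : String)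
    (h1 : ∀ c ∈ u1.toList, PySem.Chars.islower c = false)
    (h2 : ∀ c ∈ u2.toList, PySem.Chars.islower c = false) :
    (if u1 == u2 then true else pvLoopA u1 u2 pvGroupsA) =
      (pvCanonMap.getD u1 u1 == pvCanonMap.getD u2 u2) := by
  by_cases heq : u1 = u2
  · subst heq; simp
  · rw [if_neg (by simpa using heq)]
    by_cases m1 : u1 ∈ pvAll
    · by_cases m2 : u2 ∈ pvAll
      · simp only [pvAll, List.mem_cons, List.not_mem_nil, or_false] at m1 m2
        rcases m1 with rfl|rfl|rfl|rfl|rfl|rfl|rfl|rfl|rfl|rfl|rfl|rfl|rfl|rfl|rfl|rfl|rfl|rfl <;>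
          rcases m2 with rfl|rfl|rfl|rfl|rfl|rfl|rfl|rfl|rfl|rfl|rfl|rfl|rfl|rfl|rfl|rfl|rfl|rfl <;>
          first | (exact absurd rfl heq) | decide
      · rw [pvLoopA_notin_right m2, pvGetD_notin m2]
        have hg := pvGetD_mem m1
        have hne : pvCanonMap.getD u1 u1 ≠ u2 := fun he => pvNotGroupName h2 (he ▸ hg)
        simp [hne]
    · rw [pvLoopA_notin_left m1, pvGetD_notin m1]
      by_cases m2 : u2 ∈ pvAll
      · have hg := pvGetD_mem m2
        have hne : u1 ≠ pvCanonMap.getD u2 u2 :=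
          fun he => pvNotGroupName h1 (by rw [he]; exact hg)
        simp [hne]
      · rw [pvGetD_notin m2]
        simp [heq]

-- ===== VERDICT (by name: the statement is the Claim_ definition above) =====
theorem positions_match_py_spec : Claim_equal_positions_match_py := by
  intro pos1 pos2 _
  unfold Spec_positions_match_py positions_match_py positions_match_py_alt pvCanon
  exact pvCore _ _ (pvNoLower pos1) (pvNoLower pos2)
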